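-- pv_equiv track=rewrite | github.com/sacktock/MASA-Safe-RL | masa/envs/multiagent/matrix/dpgg.py | action_names
-- ===== SOURCE A (Python) =====
-- from enum import IntEnum
--
-- class Actions(IntEnum):
--     Contribute = 0
--     Withhold   = 1
--
-- def action_names(action: int) -> str:
--     """
--     Human-friendly name for an action integer ID.
--     """
--     try:
--         name = Actions(int(action)).name
--     except ValueError:
--         return f"action_{action}"
--     return "".join(
--         f"_{ch.lower()}" if ch.isupper() and i > 0 else ch.lower()
--         for i, ch in enumerate(name)
--     )
-- ===== SOURCE B (Python) =====
-- _ACTION_TABLE = {0: "contribute", 1: "withhold"}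
--
-- def action_names(action: int) -> str:
--     """
--     Human-friendly name for an action integer ID.
--     """
--     try:
--         return _ACTION_TABLE[int(action)]
--     except (ValueError, KeyError):
--         return f"action_{action}"
-- ===== Notes on version B (the rewrite author's own statement) =====
-- stated objective: simpler
-- what changed: Replaced the enum lookup plus per-character CamelCase-to-snake_case generator loop with a direct table lookup of the precomputed snake_case names, keeping the same fallback string.
import Mathlib
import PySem

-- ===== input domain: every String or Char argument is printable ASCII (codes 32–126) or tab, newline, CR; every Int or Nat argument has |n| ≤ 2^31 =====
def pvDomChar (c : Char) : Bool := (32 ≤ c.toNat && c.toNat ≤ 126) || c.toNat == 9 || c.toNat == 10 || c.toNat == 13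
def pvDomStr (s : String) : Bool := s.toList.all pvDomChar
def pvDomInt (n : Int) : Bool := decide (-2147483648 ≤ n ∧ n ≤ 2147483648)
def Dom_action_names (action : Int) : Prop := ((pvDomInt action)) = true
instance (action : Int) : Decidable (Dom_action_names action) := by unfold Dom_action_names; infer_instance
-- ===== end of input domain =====

-- B replaces A's per-character CamelCase→snake_case generator loop with a direct table lookup (objective: simpler).

-- ===== PORT A =====
-- Actions(int(action)).name: valid enum values are 0 (Contribute) and 1 (Withhold); other ints raise ValueError.
def action_names (action : Int) : String :=
  if action = 0 ∨ action = 1 then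
    let name : String := if action = 0 then "Contribute" else "Withhold"
    String.ofList ((PySem.List.enumerate name.toList).flatMap
      (fun p => if PySem.Chars.isupper p.2 && decide (0 < p.1)
                then ['_', PySem.Chars.lowerChar p.2]
                else [PySem.Chars.lowerChar p.2]))
  else
    "action_" ++ PySem.Int.toStr action

-- ===== PORT B =====
def pvActionTable : PySem.Dict Int String := PySem.Dict.ofList [(0, "contribute"), (1, "withhold")]

def action_names_alt (action : Int) : String :=
  match pvActionTable.get? action with
  | some s => s
  | none => "action_" ++ PySem.Int.toStr action

-- ===== PRECONDITION & SPEC =====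
def Spec_action_names (action : Int) (out : String) : Prop := out = action_names_alt action
instance (action : Int) (out : String) : Decidable (Spec_action_names action out) := by unfold Spec_action_names; infer_instance

-- ===== CLAIM (what is proved, stated in full; the proofs are below) =====
def Claim_equal_action_names : Prop := ∀ (action : Int), Dom_action_names action → Spec_action_names action (action_names action)

-- ===== LEMMAS AND PROOFS =====

-- ===== VERDICT (by name: the statement is the Claim_ definition above) =====
theorem action_names_spec : Claim_equal_action_names := by
  intro action _
  unfold Spec_action_names action_names action_names_alt pvActionTable
  by_cases h0 : action = 0
  · subst h0; decide
  · by_cases h1 : action = 1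
    · subst h1; decide
    · have e0 : ((0 : Int) == action) = false := beq_eq_false_iff_ne.mpr (fun h => h0 h.symm)
      have e1 : ((1 : Int) == action) = false := beq_eq_false_iff_ne.mpr (fun h => h1 h.symm)
      simp [h0, h1, e0, e1, PySem.Dict.ofList, PySem.Dict.empty, PySem.Dict.update, PySem.Dict.insert, PySem.Dict.get?, List.find?]
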